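-- pv_equiv track=rewrite | github.com/wbolster/black-macchiato | macchiato.py | count_surrounding_blank_lines
-- ===== SOURCE A (Python) =====
-- import itertools
-- from typing import IO, Iterable, List, NamedTuple, Optional, Tuple, cast
--
-- def is_blank_string(s):
--     return s.isspace() or not s
--
-- def count_surrounding_blank_lines(lines: Iterable[str]) -> Tuple[int, int]:
--     before = 0
--     after = 0
--     grouper = itertools.groupby(lines, is_blank_string)
--     try:
--         is_blank, group = next(grouper)
--     except StopIteration:
--         pass
--     else:
--         if is_blank:
--             before = len(list(group))
--
--     for is_blank, group in grouper:
--         after = len(list(group)) if is_blank else 0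
--
--     return before, after
-- ===== SOURCE B (Python) =====
-- def is_blank_string(s):
--     return s.isspace() or not s
--
-- def count_surrounding_blank_lines(lines):
--     lines = list(lines)
--     n = len(lines)
--     before = 0
--     while before < n and is_blank_string(lines[before]):
--         before += 1
--     after = 0
--     i = n - 1
--     while i >= before and is_blank_string(lines[i]):
--         after += 1
--         i -= 1
--     return before, after
-- ===== Notes on version B (the rewrite author's own statement) =====
-- stated objective: simpler
-- what changed: Replaces the itertools.groupby run-grouping (and its last-group-overwrite loop) by two direct index scans: count the leading blank run, then count the trailing blank run stopping at the leading run's end (which reproduces after=0 on all-blank input without grouping).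
import Mathlib
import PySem

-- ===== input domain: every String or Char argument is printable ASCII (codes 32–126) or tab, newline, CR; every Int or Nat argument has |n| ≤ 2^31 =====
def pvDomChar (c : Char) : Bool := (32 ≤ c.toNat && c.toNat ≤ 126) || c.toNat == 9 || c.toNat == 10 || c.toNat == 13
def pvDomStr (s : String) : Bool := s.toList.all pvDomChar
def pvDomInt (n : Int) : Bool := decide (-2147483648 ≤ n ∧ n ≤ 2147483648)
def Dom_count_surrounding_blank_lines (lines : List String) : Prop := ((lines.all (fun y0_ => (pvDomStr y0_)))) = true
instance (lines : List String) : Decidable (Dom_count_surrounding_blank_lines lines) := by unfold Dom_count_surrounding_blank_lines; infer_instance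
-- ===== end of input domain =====

-- B replaces A's groupby run-grouping by two direct index scans (leading run, then trailing run stopping at the leading run's end); same O(n) cost, simpler.

-- ===== PORT A =====
-- is_blank_string(s) = s.isspace() or not s
def pyIsBlankString (s : String) : Bool := PySem.Str.strIsspace s || s == ""

-- itertools.groupby(lines, is_blank_string) materialised as the list of (key, run length)
def pvGroupRuns : List String → List (Bool × Nat)
  | [] => []
  | s :: rest =>
    match pvGroupRuns rest with
    | [] => [(pyIsBlankString s, 1)]
    | (b, n) :: t =>
      if pyIsBlankString s = b then (b, n + 1) :: t
      else (pyIsBlankString s, 1) :: (b, n) :: t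

def count_surrounding_blank_lines (lines : List String) : Int × Int :=
  match pvGroupRuns lines with
  | [] => (0, 0)                                   -- StopIteration: before = after = 0
  | (b, n) :: rest =>
    let before : Int := if b then (n : Int) else 0
    let after : Int := rest.foldl (fun _ p => if p.1 then (p.2 : Int) else 0) 0
    (before, after)

-- ===== PORT B =====
-- the leading run of blank lines (B's first while loop)
def pvCountLeadingBlank : List String → Nat
  | [] => 0
  | s :: rest => if pyIsBlankString s then pvCountLeadingBlank rest + 1 else 0

def count_surrounding_blank_lines_alt (lines : List String) : Int × Int :=
  let before := pvCountLeadingBlank lines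
  -- B's second while loop: scan from the end down to index `before`
  let after := pvCountLeadingBlank ((lines.drop before).reverse)
  ((before : Int), (after : Int))

-- ===== PRECONDITION & SPEC =====
def Spec_count_surrounding_blank_lines (lines : List String) (out : Int × Int) : Prop := out = count_surrounding_blank_lines_alt lines
instance (lines : List String) (out : Int × Int) : Decidable (Spec_count_surrounding_blank_lines lines out) := by unfold Spec_count_surrounding_blank_lines; infer_instance

-- ===== CLAIM (what is proved, stated in full; the proofs are below) =====
def Claim_equal_count_surrounding_blank_lines : Prop := ∀ (lines : List String), Dom_count_surrounding_blank_lines lines → Spec_count_surrounding_blank_lines lines (count_surrounding_blank_lines lines)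

-- ===== LEMMAS AND PROOFS =====

-- how pvGroupRuns unfolds on a cons, given the runs of the tail
theorem pvGR_cons_nil (s : String) (rest : List String) (h : pvGroupRuns rest = []) :
    pvGroupRuns (s :: rest) = [(pyIsBlankString s, 1)] := by
  simp only [pvGroupRuns, h]

theorem pvGR_cons_eq (s : String) (rest : List String) (b : Bool) (n : Nat)
    (t : List (Bool × Nat)) (h : pvGroupRuns rest = (b, n) :: t)
    (hbs : pyIsBlankString s = b) :
    pvGroupRuns (s :: rest) = (b, n + 1) :: t := by
  simp only [pvGroupRuns, h]; rw [if_pos hbs]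

theorem pvGR_cons_ne (s : String) (rest : List String) (b : Bool) (n : Nat)
    (t : List (Bool × Nat)) (h : pvGroupRuns rest = (b, n) :: t)
    (hbs : ¬ pyIsBlankString s = b) :
    pvGroupRuns (s :: rest) = (pyIsBlankString s, 1) :: (b, n) :: t := by
  simp only [pvGroupRuns, h]; rw [if_neg hbs]

-- counting leading blanks across an append
theorem pvCLA (xs ys : List String) :
    pvCountLeadingBlank (xs ++ ys) =
      if xs.all pyIsBlankString then xs.length + pvCountLeadingBlank ys
      else pvCountLeadingBlank xs := by
  induction xs with
  | nil => simp [pvCountLeadingBlank]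
  | cons s xs ih =>
    simp only [List.cons_append, pvCountLeadingBlank, ih, List.all_cons, List.length_cons]
    cases h : pyIsBlankString s
    · simp
    · cases hall : xs.all pyIsBlankString <;> simp [hall] <;> omega

theorem pvALLcl (xs : List String) (h : xs.all pyIsBlankString = true) :
    pvCountLeadingBlank xs = xs.length := by
  have := pvCLA xs []
  simp only [List.append_nil, h, if_true] at this
  simpa [pvCountLeadingBlank] using this

theorem pvCL0 (xs : List String) (h : ∀ x ∈ xs, pyIsBlankString x = false) :
    pvCountLeadingBlank xs = 0 := by
  cases xs with
  | nil => rfl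
  | cons y t => simp [pvCountLeadingBlank, h y (by simp)]

theorem pvGR_nil (ls : List String) : pvGroupRuns ls = [] ↔ ls = [] := by
  cases ls with
  | nil => simp [pvGroupRuns]
  | cons s rest =>
    cases h : pvGroupRuns rest with
    | nil => rw [pvGR_cons_nil s rest h]; simp
    | cons p t =>
      obtain ⟨b, n⟩ := p
      by_cases hbs : pyIsBlankString s = b
      · rw [pvGR_cons_eq s rest b n t h hbs]; simp
      · rw [pvGR_cons_ne s rest b n t h hbs]; simp

theorem pvHEAD (ls : List String) (b : Bool) (n : Nat) (t : List (Bool × Nat))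
    (h : pvGroupRuns ls = (b, n) :: t) :
    pvCountLeadingBlank ls = if b then n else 0 := by
  induction ls generalizing b n t with
  | nil => simp [pvGroupRuns] at h
  | cons s rest ih =>
    cases h' : pvGroupRuns rest with
    | nil =>
      rw [pvGR_cons_nil s rest h'] at h
      simp only [List.cons.injEq, Prod.mk.injEq] at h
      obtain ⟨⟨hb, hn⟩, ht⟩ := h
      have hrest : rest = [] := (pvGR_nil rest).mp h'
      subst hrest; subst hb; subst hn
      cases hbs : pyIsBlankString s <;> simp [pvCountLeadingBlank, hbs]
    | cons p t' =>
      obtain ⟨b', n'⟩ := p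
      by_cases hbs : pyIsBlankString s = b'
      · rw [pvGR_cons_eq s rest b' n' t' h' hbs] at h
        simp only [List.cons.injEq, Prod.mk.injEq] at h
        obtain ⟨⟨hb, hn⟩, ht⟩ := h
        subst hb; subst hn
        have := ih b' n' t' h'
        cases hB : b' <;> simp_all [pvCountLeadingBlank]
      · rw [pvGR_cons_ne s rest b' n' t' h' hbs] at h
        simp only [List.cons.injEq, Prod.mk.injEq] at h
        obtain ⟨⟨hb, hn⟩, ht⟩ := h
        subst hb; subst hn
        have hrest := ih b' n' t' h'
        cases hB : pyIsBlankString s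
        · simp [pvCountLeadingBlank, hB]
        · have hb' : b' = false := by
            cases hb'' : b'
            · rfl
            · exact absurd (hB.trans hb''.symm) hbs
          simp [pvCountLeadingBlank, hB, hrest, hb']

theorem pvUNIF (ls : List String) (b : Bool) (n : Nat)
    (h : pvGroupRuns ls = [(b, n)]) :
    n = ls.length ∧ ∀ x ∈ ls, pyIsBlankString x = b := by
  induction ls generalizing b n with
  | nil => simp [pvGroupRuns] at h
  | cons s rest ih =>
    cases h' : pvGroupRuns rest with
    | nil =>
      rw [pvGR_cons_nil s rest h'] at h
      simp only [List.cons.injEq, Prod.mk.injEq] at h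
      obtain ⟨⟨hb, hn⟩, -⟩ := h
      have hrest : rest = [] := (pvGR_nil rest).mp h'
      subst hrest; subst hb; subst hn
      simp
    | cons p t' =>
      obtain ⟨b', n'⟩ := p
      by_cases hbs : pyIsBlankString s = b'
      · rw [pvGR_cons_eq s rest b' n' t' h' hbs] at h
        simp only [List.cons.injEq, Prod.mk.injEq] at h
        obtain ⟨⟨hb, hn⟩, ht⟩ := h
        subst hb; subst hn; subst ht
        obtain ⟨hlen, hall⟩ := ih b' n' h'
        refine ⟨by simp [← hlen], ?_⟩
        intro x hx
        rcases List.mem_cons.mp hx with rfl | hx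
        · exact hbs
        · exact hall x hx
      · rw [pvGR_cons_ne s rest b' n' t' h' hbs] at h
        simp at h

theorem pvALLGR (ls : List String) (h : ls.all pyIsBlankString = true) :
    pvGroupRuns ls = [] ∨ ∃ n, pvGroupRuns ls = [(true, n)] := by
  induction ls with
  | nil => left; rfl
  | cons s rest ih =>
    simp only [List.all_cons, Bool.and_eq_true] at h
    obtain ⟨hs, hrest⟩ := h
    rcases ih hrest with h0 | ⟨n, h1⟩
    · right; exact ⟨1, by rw [pvGR_cons_nil s rest h0, hs]⟩
    · right; exact ⟨n + 1, by rw [pvGR_cons_eq s rest true n [] h1 hs]⟩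

theorem pvACC (t : List (Bool × Nat)) (a a' : Int) (ht : t ≠ []) :
    t.foldl (fun _ p => if p.1 then (p.2 : Int) else 0) a =
    t.foldl (fun _ p => if p.1 then (p.2 : Int) else 0) a' := by
  cases t with
  | nil => exact absurd rfl ht
  | cons c t'' => simp [List.foldl]

theorem pvAFT (ls : List String) (hne : ls ≠ []) (a : Int) :
    (pvGroupRuns ls).foldl (fun _ p => if p.1 then (p.2 : Int) else 0) a =
      (pvCountLeadingBlank ls.reverse : Int) := by
  induction ls generalizing a with
  | nil => exact absurd rfl hne
  | cons s rest ih =>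
    cases h' : pvGroupRuns rest with
    | nil =>
      have hrest : rest = [] := (pvGR_nil rest).mp h'
      subst hrest
      rw [pvGR_cons_nil s [] h']
      cases hs : pyIsBlankString s <;> simp [List.foldl, hs, pvCountLeadingBlank]
    | cons p t' =>
      obtain ⟨b', n'⟩ := p
      have hrne : rest ≠ [] := by
        intro hr; rw [hr] at h'; simp [pvGroupRuns] at h'
      have htb : ∀ a'' : Int, ((b', n') :: t').foldl (fun _ p => if p.1 then (p.2 : Int) else 0) a''
          = (pvCountLeadingBlank rest.reverse : Int) := by
        intro a''; rw [← h']; exact ih hrne a''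
      by_cases hbs : pyIsBlankString s = b'
      · -- merged into the first run
        rw [pvGR_cons_eq s rest b' n' t' h' hbs]
        cases ht' : t' with
        | nil =>
          obtain ⟨hlen, hall⟩ := pvUNIF rest b' n' (by rw [h', ht'])
          subst ht'
          cases hb' : b'
          · -- no line blank: both sides 0
            rw [hb'] at hbs hall
            have h0 : pvCountLeadingBlank (rest.reverse ++ [s]) = 0 := by
              apply pvCL0
              intro x hx
              rcases List.mem_append.mp hx with hx | hx
              · exact hall x (List.mem_reverse.mp hx)
              · simp at hx; subst hx; exact hbs
            simp [List.foldl, List.reverse_cons, h0]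
          · rw [hb'] at hbs hall
            have hallrev : rest.reverse.all pyIsBlankString = true := by
              rw [List.all_reverse]
              exact List.all_eq_true.mpr (fun x hx => hall x hx)
            have h1 : pvCountLeadingBlank (rest.reverse ++ [s]) = rest.length + 1 := by
              rw [pvCLA, if_pos hallrev]
              simp [pvCountLeadingBlank, hbs]
            simp [List.foldl, List.reverse_cons, h1, ← hlen]
        | cons c t'' =>
          -- at least two runs in rest ⇒ rest not all blank
          have hnall : rest.all pyIsBlankString = false := by
            cases hA : rest.all pyIsBlankString
            · rfl
            · exfalso
              rcases pvALLGR rest hA with hh | ⟨m, hh⟩ <;> rw [hh] at h' <;>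
                simp [ht'] at h'
          have htbs : pvCountLeadingBlank ((s :: rest).reverse) = pvCountLeadingBlank rest.reverse := by
            rw [List.reverse_cons, pvCLA]
            simp [hnall, List.all_reverse]
          rw [htbs, ← htb a]
          rw [ht']
          simp [List.foldl_cons]
      · -- a fresh run is prepended
        rw [pvGR_cons_ne s rest b' n' t' h' hbs, List.foldl_cons]
        rw [htb]
        -- tb (s :: rest) = tb rest
        cases h0 : rest.all pyIsBlankString
        · rw [List.reverse_cons, pvCLA]
          simp [List.all_reverse, h0]
        · -- rest all blank: then runs rest = [(true, m)], so b' = true and s is not blank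
          rcases pvALLGR rest h0 with hh | ⟨m, hh⟩
          · rw [hh] at h'; simp at h'
          · rw [hh] at h'
            simp only [List.cons.injEq, Prod.mk.injEq] at h'
            obtain ⟨⟨hb', hn'⟩, ht'⟩ := h'
            have hs : pyIsBlankString s = false := by
              cases h1 : pyIsBlankString s
              · rfl
              · exact absurd (h1.trans hb') hbs
            have hallrev : rest.reverse.all pyIsBlankString = true := by
              rw [List.all_reverse]; exact h0
            rw [List.reverse_cons, pvCLA, if_pos hallrev,
                pvALLcl rest.reverse (by rw [List.all_reverse]; exact h0)]
            simp [pvCountLeadingBlank, hs]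

-- A computes (leading blank run, trailing blank run — 0 when the whole input is blank)
theorem pvMAINA (ls : List String) :
    count_surrounding_blank_lines ls =
      ((pvCountLeadingBlank ls : Int),
        if ls.all pyIsBlankString then 0 else (pvCountLeadingBlank ls.reverse : Int)) := by
  cases h : pvGroupRuns ls with
  | nil =>
    have : ls = [] := (pvGR_nil ls).mp h
    subst this
    simp [count_surrounding_blank_lines, pvGroupRuns, pvCountLeadingBlank]
  | cons p t =>
    obtain ⟨b, n⟩ := p
    have hne : ls ≠ [] := by
      intro h0; rw [h0] at h; simp [pvGroupRuns] at h
    have hcl := pvHEAD ls b n t h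
    have hfst : (if b then (n : Int) else 0) = (pvCountLeadingBlank ls : Int) := by
      rw [hcl]; cases b <;> simp
    cases ht : t with
    | nil =>
      obtain ⟨hlen, hall⟩ := pvUNIF ls b n (by rw [h, ht])
      subst ht
      simp only [count_surrounding_blank_lines, h, List.foldl_nil]
      refine Prod.ext hfst ?_
      cases hb : b
      · rw [hb] at hall
        have h0 : pvCountLeadingBlank ls.reverse = 0 :=
          pvCL0 _ (fun x hx => hall x (List.mem_reverse.mp hx))
        simp [h0]
      · rw [hb] at hall
        have : ls.all pyIsBlankString = true := List.all_eq_true.mpr (fun x hx => hall x hx)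
        simp [this]
    | cons c t' =>
      subst ht
      simp only [count_surrounding_blank_lines, h]
      refine Prod.ext hfst ?_
      have hnall : ls.all pyIsBlankString = false := by
        cases hA : ls.all pyIsBlankString
        · rfl
        · exfalso
          rcases pvALLGR ls hA with hh | ⟨m, hh⟩ <;> rw [hh] at h <;> simp at h
      have haft := pvAFT ls hne 0
      rw [h, List.foldl_cons] at haft
      simp only [hnall, Bool.false_eq_true, if_false]
      exact (pvACC (c :: t') 0 _ (by simp)).trans haft

theorem pvDROPNA (ls : List String) (h : ls.all pyIsBlankString = false) :
    (ls.drop (pvCountLeadingBlank ls)).all pyIsBlankString = false := by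
  induction ls with
  | nil => simp at h
  | cons s rest ih =>
    cases hs : pyIsBlankString s
    · simpa [pvCountLeadingBlank, hs, List.all_cons] using hs
    · simp only [List.all_cons, hs, Bool.true_and] at h
      simpa [pvCountLeadingBlank, hs] using ih h

-- B computes the same pair
theorem pvMAINB (ls : List String) :
    count_surrounding_blank_lines_alt ls =
      ((pvCountLeadingBlank ls : Int),
        if ls.all pyIsBlankString then 0 else (pvCountLeadingBlank ls.reverse : Int)) := by
  simp only [count_surrounding_blank_lines_alt]
  refine Prod.ext rfl ?_
  cases h0 : ls.all pyIsBlankString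
  · -- not all blank: the trailing run of the dropped part is the trailing run of ls
    have hsplit : ls.reverse = (ls.drop (pvCountLeadingBlank ls)).reverse
        ++ (ls.take (pvCountLeadingBlank ls)).reverse := by
      rw [← List.reverse_append, List.take_append_drop]
    have hda : (ls.drop (pvCountLeadingBlank ls)).reverse.all pyIsBlankString = false := by
      rw [List.all_reverse]; exact pvDROPNA ls h0
    simp only [h0, Bool.false_eq_true, if_false]
    rw [hsplit, pvCLA, hda]
    simp
  · have hlen : pvCountLeadingBlank ls = ls.length := pvALLcl ls h0
    simp [h0, hlen, pvCountLeadingBlank]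

-- ===== VERDICT (by name: the statement is the Claim_ definition above) =====
theorem count_surrounding_blank_lines_spec : Claim_equal_count_surrounding_blank_lines := by
  intro lines _
  unfold Spec_count_surrounding_blank_lines
  rw [pvMAINA, pvMAINB]
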